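-- pv_equiv track=rewrite | github.com/vincent-kk/Basic-Algorithm | programmers/lv2/12913.py | solution
-- ===== SOURCE A (Python) =====
-- from typing import List
--
-- def solution(lands: List[List[int]]) -> int:
--     """
--     땅따먹기 게임
--     N행 4열로 구성되어 있음
--     0행부터 땅을 밟으며 내려옴
--     1개 행당 1개 셀만 밟을 수 있음
--     같은 열을 연속해서 밟을 수 없음
--
--     Args:
--         land (List[List[int]]): N행 4열로 구성된 2차원 배열
--
--     Returns:
--         int: 0번부터 N-1번까지 순회하였을때, 지나친 땅의 최대값
--     """
--     row, calumn = len(lands), len(lands[0])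
--
--     # dp = [[0 for _ in range(calumn)] for _ in range(row)]
--     dp = ([0] * calumn, lands[0][:])
--
--     for n in range(1, row):
--         for i in range(calumn):
--             prev_max = -1
--             for j in range(calumn):
--                 if i == j:
--                     continue
--                 prev_max = max(prev_max, dp[n % 2][j])
--             dp[(n + 1) % 2][i] = lands[n][i] + prev_max
--
--     return max(dp[row % 2])
-- ===== SOURCE B (Python) =====
-- from typing import List
--
-- def solution(lands: List[List[int]]) -> int:
--     c = len(lands[0])
--     dp = lands[0][:]
--     for n in range(1, len(lands)):
--         best = second = imax = -1
--         for j in range(c):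
--             v = dp[j]
--             if v > best:
--                 best, second, imax = v, best, j
--             elif v > second:
--                 second = v
--         dp = [lands[n][i] + (second if i == imax else best) for i in range(c)]
--     return max(dp)
-- ===== Notes on version B (the rewrite author's own statement) =====
-- stated objective: faster
-- what changed: B keeps a single rolling dp row and replaces A's inner 'for each cell, rescan all other cells for their max' double loop by one top-two scan (best, second-best, argmax) of the previous row followed by a single pass building the next row.
import Mathlib
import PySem

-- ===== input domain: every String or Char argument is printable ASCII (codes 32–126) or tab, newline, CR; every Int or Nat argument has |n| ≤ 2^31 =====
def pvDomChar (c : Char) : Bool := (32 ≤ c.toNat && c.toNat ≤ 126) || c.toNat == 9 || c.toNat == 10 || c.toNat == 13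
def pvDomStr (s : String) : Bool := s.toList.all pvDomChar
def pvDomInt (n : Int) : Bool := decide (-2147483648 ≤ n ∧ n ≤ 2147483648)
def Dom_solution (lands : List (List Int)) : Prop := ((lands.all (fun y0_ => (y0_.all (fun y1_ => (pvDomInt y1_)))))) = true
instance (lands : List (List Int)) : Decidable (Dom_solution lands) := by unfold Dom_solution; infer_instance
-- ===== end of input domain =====

-- B replaces A's inner O(c^2) "max over all j != i" double scan by one top-two scan
-- of the previous dp row plus a single O(c) pass per row (objective: faster per-row work).

-- ===== PORT A =====
-- literal transliteration of Source A: two alternating dp buffers dp[0], dp[1];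
-- for each row n, each cell i gets lands[n][i] + max(-1, dp[n%2][j] for j != i);
-- indices produced by range(...) are nonnegative and in range under Pre_, so pyGetD/pySetD are exact.
def solution (lands : List (List Int)) : Int :=
  let row : Int := PySem.List.len lands
  let c : Int := PySem.List.len (PySem.List.pyGetD lands 0 [])
  let dp : List Int × List Int :=
    (List.replicate c.toNat 0, PySem.List.pyGetD lands 0 [])
  let dp := (PySem.List.pyRange 1 row 1).foldl (fun dp n =>
    let rd := if PySem.Int.mod n 2 = 0 then dp.1 else dp.2        -- dp[n % 2]
    let wr := (PySem.List.pyRange 0 c 1).foldl (fun wr i =>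
      let prev_max := (PySem.List.pyRange 0 c 1).foldl (fun pm j =>
        if i = j then pm else max pm (PySem.List.pyGetD rd j 0)) (-1)
      PySem.List.pySetD wr i
        (PySem.List.pyGetD (PySem.List.pyGetD lands n []) i 0 + prev_max))
      (if PySem.Int.mod n 2 = 0 then dp.2 else dp.1)              -- dp[(n+1) % 2]
    if PySem.Int.mod n 2 = 0 then (dp.1, wr) else (wr, dp.2)) dp
  (PySem.List.max? (if PySem.Int.mod row 2 = 0 then dp.1 else dp.2) (fun y => y)).getD 0

-- ===== PORT B =====
-- literal transliteration of Source B: one dp row; per row a top-two scan (best, second, imax)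
-- of the previous dp, then one pass building the next dp.
def solution_alt (lands : List (List Int)) : Int :=
  let c : Int := PySem.List.len (PySem.List.pyGetD lands 0 [])
  let dp := (PySem.List.pyRange 1 (PySem.List.len lands) 1).foldl (fun dp n =>
    let t := (PySem.List.pyRange 0 c 1).foldl (fun (t : Int × Int × Int) j =>
      let v := PySem.List.pyGetD dp j 0
      if t.1 < v then (v, t.1, j)
      else if t.2.1 < v then (t.1, v, t.2.2)
      else t) (-1, -1, -1)
    (PySem.List.pyRange 0 c 1).map (fun i =>
      PySem.List.pyGetD (PySem.List.pyGetD lands n []) i 0 +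
        (if i = t.2.2 then t.2.1 else t.1))) (PySem.List.pyGetD lands 0 [])
  (PySem.List.max? dp (fun y => y)).getD 0

-- ===== PRECONDITION & SPEC =====
-- Pre_ excludes exactly the inputs where the Python A raises: empty lands / empty first
-- row (IndexError / ValueError on max([])) and rows shorter than the first row (IndexError).
def Pre_solution (lands : List (List Int)) : Prop :=
  0 < (lands.headD []).length ∧ ∀ r ∈ lands, (lands.headD []).length ≤ r.length
instance (lands : List (List Int)) : Decidable (Pre_solution lands) := by
  unfold Pre_solution; infer_instance
def pvWitness_solution : List (List Int) := [[1, 2, 3], [4, 5, 6], [7, 8, 9]]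
def Spec_solution (lands : List (List Int)) (out : Int) : Prop := out = solution_alt lands
instance (lands : List (List Int)) (out : Int) : Decidable (Spec_solution lands out) := by
  unfold Spec_solution; infer_instance

-- ===== CLAIM (what is proved, stated in full; the proofs are below) =====
def Claim_equal_solution : Prop := ∀ (lands : List (List Int)),
  Dom_solution lands → Pre_solution lands → Spec_solution lands (solution lands)

-- ===== LEMMAS AND PROOFS =====

-- A's row-step: read dp[n%2], overwrite dp[(n+1)%2] cell by cell
def pvStepA (lands : List (List Int)) (c : Int) :
    List Int × List Int → Int → List Int × List Int := fun dp n =>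
  let rd := if PySem.Int.mod n 2 = 0 then dp.1 else dp.2
  let wr := (PySem.List.pyRange 0 c 1).foldl (fun wr i =>
    let prev_max := (PySem.List.pyRange 0 c 1).foldl (fun pm j =>
      if i = j then pm else max pm (PySem.List.pyGetD rd j 0)) (-1)
    PySem.List.pySetD wr i
      (PySem.List.pyGetD (PySem.List.pyGetD lands n []) i 0 + prev_max))
    (if PySem.Int.mod n 2 = 0 then dp.2 else dp.1)
  if PySem.Int.mod n 2 = 0 then (dp.1, wr) else (wr, dp.2)

-- B's row-step: top-two scan of dp, then one building pass
def pvStepB (lands : List (List Int)) (c : Int) : List Int → Int → List Int := fun dp n =>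
  let t := (PySem.List.pyRange 0 c 1).foldl (fun (t : Int × Int × Int) j =>
    let v := PySem.List.pyGetD dp j 0
    if t.1 < v then (v, t.1, j)
    else if t.2.1 < v then (t.1, v, t.2.2)
    else t) (-1, -1, -1)
  (PySem.List.pyRange 0 c 1).map (fun i =>
    PySem.List.pyGetD (PySem.List.pyGetD lands n []) i 0 +
      (if i = t.2.2 then t.2.1 else t.1))

theorem solution_eq (lands : List (List Int)) :
    solution lands =
      (let row : Int := PySem.List.len lands
       let c : Int := PySem.List.len (PySem.List.pyGetD lands 0 [])
       let r := (PySem.List.pyRange 1 row 1).foldl (pvStepA lands c)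
         (List.replicate c.toNat 0, PySem.List.pyGetD lands 0 [])
       (PySem.List.max? (if PySem.Int.mod row 2 = 0 then r.1 else r.2) (fun y => y)).getD 0) := rfl

theorem solution_alt_eq (lands : List (List Int)) :
    solution_alt lands =
      (let c : Int := PySem.List.len (PySem.List.pyGetD lands 0 [])
       let r := (PySem.List.pyRange 1 (PySem.List.len lands) 1).foldl (pvStepB lands c)
         (PySem.List.pyGetD lands 0 [])
       (PySem.List.max? r (fun y => y)).getD 0) := rfl

-- A's "max over j != i, floored at -1" of the previous dp row, as a function of g = dp lookup
def pvE (g : Int → Int) (k : ℕ) (i : Int) : Int :=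
  (PySem.List.pyRange 0 (k : Int) 1).foldl
    (fun pm j => if i = j then pm else max pm (g j)) (-1)

-- B's top-two scan state (best, second, imax)
def pvT (g : Int → Int) (k : ℕ) : Int × Int × Int :=
  (PySem.List.pyRange 0 (k : Int) 1).foldl (fun t j =>
    let v := g j
    if t.1 < v then (v, t.1, j)
    else if t.2.1 < v then (t.1, v, t.2.2)
    else t) (-1, -1, -1)

-- loop invariant of the top-two scan: it selects A's excluded-index maximum for every i
theorem pvT_invariant (g : Int → Int) (k : ℕ) :
    (∀ i : Int, pvE g k i = if i = (pvT g k).2.2 then (pvT g k).2.1 else (pvT g k).1) ∧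
    (pvT g k).2.1 ≤ (pvT g k).1 ∧
    (((pvT g k).2.2 = -1 ∧ (pvT g k).2.1 = (pvT g k).1) ∨
      (0 ≤ (pvT g k).2.2 ∧ (pvT g k).2.2 < (k : Int))) := by
  induction k with
  | zero =>
    have h0 : PySem.List.pyRange 0 ((0:ℕ):Int) 1 = [] :=
      PySem.List.pyRange_one_eq_nil (by simp)
    refine ⟨fun i => ?_, ?_, ?_⟩ <;> simp [pvE, pvT]
  | succ k ih =>
    obtain ⟨hE, hsb, him⟩ := ih
    have hr : PySem.List.pyRange 0 ((k:Int)+1) 1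
        = PySem.List.pyRange 0 (k:Int) 1 ++ [(k:Int)] :=
      PySem.List.pyRange_one_succ_right (by positivity)
    have hT : pvT g (k+1) =
        (if (pvT g k).1 < g (k:Int) then (g (k:Int), (pvT g k).1, (k:Int))
         else if (pvT g k).2.1 < g (k:Int) then ((pvT g k).1, g (k:Int), (pvT g k).2.2)
         else pvT g k) := by
      simp only [pvT, Nat.cast_add, Nat.cast_one, hr, List.foldl_append,
        List.foldl_cons, List.foldl_nil]
    have hE' : ∀ i, pvE g (k+1) i =
        if i = (k:Int) then pvE g k i else max (pvE g k i) (g (k:Int)) := by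
      intro i
      simp only [pvE, Nat.cast_add, Nat.cast_one, hr, List.foldl_append,
        List.foldl_cons, List.foldl_nil]
    rcases hp : pvT g k with ⟨b, s, im⟩
    rw [hp] at hE hsb him hT
    dsimp only at hE hsb him hT
    have hT1 : (pvT g (k+1)).1 = if b < g (k:Int) then g (k:Int) else b := by
      rw [hT]; split_ifs <;> rfl
    have hT2 : (pvT g (k+1)).2.1 =
        if b < g (k:Int) then b else if s < g (k:Int) then g (k:Int) else s := by
      rw [hT]; split_ifs <;> rfl
    have hT3 : (pvT g (k+1)).2.2 = if b < g (k:Int) then (k:Int) else im := by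
      rw [hT]; split_ifs <;> rfl
    refine ⟨fun i => ?_, ?_, ?_⟩
    · rw [hE' i, hT1, hT2, hT3, hE i]
      rcases him with ⟨h1, h2⟩ | ⟨h1, h2⟩ <;> split_ifs <;> omega
    · rw [hT1, hT2]; split_ifs <;> omega
    · rw [hT1, hT2, hT3]
      rcases him with ⟨h1, h2⟩ | ⟨h1, h2⟩ <;> split_ifs <;> omega

theorem pvCell (g : Int → Int) (k : ℕ) (i : Int) :
    pvE g k i = if i = (pvT g k).2.2 then (pvT g k).2.1 else (pvT g k).1 :=
  (pvT_invariant g k).1 i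

-- writing every index 0..N-1 of a length-N buffer is the same list as mapping over the range
theorem pvSetFold (f : Int → Int) :
    ∀ (cur pre : List Int) (a b : Int), a = pre.length → b = a + cur.length →
      (PySem.List.pyRange a b 1).foldl (fun wr i => PySem.List.pySetD wr i (f i)) (pre ++ cur)
      = pre ++ (PySem.List.pyRange a b 1).map f := by
  intro cur
  induction cur with
  | nil =>
    intro pre a b ha hb
    rw [PySem.List.pyRange_one_eq_nil (by simp at hb; omega)]
    simp
  | cons x rest ih =>
    intro pre a b ha hb
    have hab : a < b := by simp at hb; omega
    rw [PySem.List.pyRange_one_cons hab, List.foldl_cons, List.map_cons]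
    have hset : PySem.List.pySetD (pre ++ x :: rest) a (f a) = (pre ++ [f a]) ++ rest := by
      rw [ha, PySem.List.pySetD_natCast]
      simp
    rw [hset, ih (pre ++ [f a]) (a+1) b (by simp [ha]) (by simp at hb; omega)]
    simp

theorem pvSetFold0 (f : Int → Int) (buf : List Int) (N : ℕ) (h : buf.length = N) :
    (PySem.List.pyRange 0 (N : Int) 1).foldl
      (fun wr i => PySem.List.pySetD wr i (f i)) buf =
    (PySem.List.pyRange 0 (N : Int) 1).map f := by
  have := pvSetFold f buf [] 0 (N : Int) (by simp) (by simp [h])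
  simpa using this

-- one row: A's write-every-cell fold on the stale buffer equals B's top-two row
theorem pvRow (lands : List (List Int)) (C : ℕ) (rd stale : List Int) (n : Int)
    (hs : stale.length = C) :
    (PySem.List.pyRange 0 (C : Int) 1).foldl (fun wr i =>
      let prev_max := (PySem.List.pyRange 0 (C : Int) 1).foldl (fun pm j =>
        if i = j then pm else max pm (PySem.List.pyGetD rd j 0)) (-1)
      PySem.List.pySetD wr i
        (PySem.List.pyGetD (PySem.List.pyGetD lands n []) i 0 + prev_max)) stale
    = pvStepB lands (C : Int) rd n := by
  have h1 : (PySem.List.pyRange 0 (C : Int) 1).foldl (fun wr i =>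
      PySem.List.pySetD wr i
        (PySem.List.pyGetD (PySem.List.pyGetD lands n []) i 0
          + pvE (fun j => PySem.List.pyGetD rd j 0) C i)) stale
      = (PySem.List.pyRange 0 (C : Int) 1).map (fun i =>
          PySem.List.pyGetD (PySem.List.pyGetD lands n []) i 0
            + pvE (fun j => PySem.List.pyGetD rd j 0) C i) :=
    pvSetFold0 _ stale C hs
  rw [show (fun (wr : List Int) (i : Int) =>
      let prev_max := (PySem.List.pyRange 0 (C : Int) 1).foldl (fun pm j =>
        if i = j then pm else max pm (PySem.List.pyGetD rd j 0)) (-1)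
      PySem.List.pySetD wr i
        (PySem.List.pyGetD (PySem.List.pyGetD lands n []) i 0 + prev_max))
      = (fun (wr : List Int) (i : Int) =>
      PySem.List.pySetD wr i
        (PySem.List.pyGetD (PySem.List.pyGetD lands n []) i 0
          + pvE (fun j => PySem.List.pyGetD rd j 0) C i)) from rfl]
  rw [h1]
  unfold pvStepB
  refine List.map_congr_left fun i _ => ?_
  rw [pvCell (fun j => PySem.List.pyGetD rd j 0) C i]
  rfl

theorem pvStepB_length (lands : List (List Int)) (C : ℕ) (dp : List Int) (n : Int) :
    (pvStepB lands (C : Int) dp n).length = C := by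
  simp [pvStepB, PySem.List.length_pyRange_one]

-- main loop invariant: B's dp equals A's buffer of parity (a+k) % 2
theorem pvLoop (lands : List (List Int)) (C : ℕ) :
    ∀ (k : ℕ) (a : Int) (d0 d1 dpB : List Int), 1 ≤ a →
      d0.length = C → d1.length = C →
      (if PySem.Int.mod a 2 = 0 then d0 else d1) = dpB →
      (if PySem.Int.mod (a + k) 2 = 0
        then ((PySem.List.pyRange a (a + k) 1).foldl (pvStepA lands (C:Int)) (d0, d1)).1
        else ((PySem.List.pyRange a (a + k) 1).foldl (pvStepA lands (C:Int)) (d0, d1)).2)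
        = (PySem.List.pyRange a (a + k) 1).foldl (pvStepB lands (C:Int)) dpB := by
  intro k
  induction k with
  | zero =>
    intro a d0 d1 dpB _ _ _ hrel
    rw [show a + ((0:ℕ):Int) = a by simp, PySem.List.pyRange_one_eq_nil (le_refl a)]
    simpa using hrel
  | succ k ih =>
    intro a d0 d1 dpB ha h0 h1 hrel
    have hcast : a + ((k+1:ℕ):Int) = (a + 1) + (k:Int) := by push_cast; ring
    have hc : PySem.List.pyRange a ((a+1) + (k:Int)) 1
        = a :: PySem.List.pyRange (a+1) ((a+1) + (k:Int)) 1 :=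
      PySem.List.pyRange_one_cons (by omega)
    rw [hcast, hc, List.foldl_cons, List.foldl_cons]
    have hdpB : dpB.length = C := by
      rcases hrel with rfl
      split <;> assumption
    have hmod : ∀ b : Int, PySem.Int.mod b 2 = b % 2 := fun b =>
      PySem.Int.mod_eq_emod_of_pos (by omega)
    -- the step at a
    by_cases hpar : PySem.Int.mod a 2 = 0
    · -- read d0 (= dpB), write d1 slot: result (d0, newRow)
      have hrd : d0 = dpB := by rw [if_pos hpar] at hrel; exact hrel
      have hstep : pvStepA lands (C:Int) (d0, d1) a = (d0, pvStepB lands (C:Int) dpB a) := by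
        unfold pvStepA
        rw [if_pos hpar, if_pos hpar, if_pos hpar]
        simp only [hrd]
        rw [pvRow lands C dpB d1 a h1]
      rw [hstep]
      have hpar' : ¬ PySem.Int.mod (a+1) 2 = 0 := by
        rw [hmod] at hpar ⊢; omega
      exact ih (a+1) d0 (pvStepB lands (C:Int) dpB a) (pvStepB lands (C:Int) dpB a)
        (by omega) h0 (pvStepB_length lands C dpB a) (by rw [if_neg hpar'])
    · -- read d1 (= dpB), write d0 slot: result (newRow, d1)
      have hrd : d1 = dpB := by rw [if_neg hpar] at hrel; exact hrel
      have hstep : pvStepA lands (C:Int) (d0, d1) a = (pvStepB lands (C:Int) dpB a, d1) := by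
        unfold pvStepA
        rw [if_neg hpar, if_neg hpar, if_neg hpar]
        simp only [hrd]
        rw [pvRow lands C dpB d0 a h0]
      rw [hstep]
      have hpar' : PySem.Int.mod (a+1) 2 = 0 := by
        rw [hmod] at hpar ⊢; omega
      exact ih (a+1) (pvStepB lands (C:Int) dpB a) d1 (pvStepB lands (C:Int) dpB a)
        (by omega) (pvStepB_length lands C dpB a) h1 (by rw [if_pos hpar'])

-- ===== VERDICT (by name: the statement is the Claim_ definition above) =====
theorem solution_spec : Claim_equal_solution := by
  intro lands _hdom hpre
  unfold Spec_solution
  obtain ⟨hC0, _hlen⟩ := hpre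
  cases lands with
  | nil => simp at hC0
  | cons h tl =>
    rw [solution_eq, solution_alt_eq]
    simp only [PySem.List.pyGetD_zero_cons, PySem.List.len_eq, List.length_cons]
    have hcast : ((tl.length + 1 : ℕ) : Int) = 1 + (tl.length : Int) := by push_cast; ring
    have := pvLoop (h :: tl) h.length tl.length 1
      (List.replicate ((h.length : Int)).toNat 0) h h
      (by omega)
      (by simp)
      rfl
      (by norm_num [PySem.Int.mod_eq_emod_of_pos])
    rw [hcast]
    rw [this]
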